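-- pv_equiv track=rewrite | github.com/khromalabs/ainara | scripts/update_headers.py | format_header
-- ===== SOURCE A (Python) =====
-- def format_header(header, ext):
--     """Format header with proper comment characters per line based on file extension."""
--     lines = header.split("\n")
--     formatted_lines = []
--
--     if ext in (".py", ".sh"):
--         formatted_lines = [f"# {line}" if line else "#" for line in lines]
--     elif ext in (".js", ".ts", ".go", ".rs", ".java"):
--         formatted_lines = [f"// {line}" if line else "//" for line in lines]
--     elif ext == ".md":
--         formatted_lines = [
--             f"<!-- {line} -->" if line else "<!-- -->" for line in lines
--         ]
--     elif ext in (".c", ".cpp", ".h", ".hpp", ".css"):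
--         formatted_lines = (
--             ["/*"]
--             + [f" * {line}" if line else " *" for line in lines]
--             + [" */"]
--         )
--
--     return "\n".join(formatted_lines)
-- ===== SOURCE B (Python) =====
-- _STYLES = {
--     **dict.fromkeys((".py", ".sh"), ("# ", "", "#", False)),
--     **dict.fromkeys((".js", ".ts", ".go", ".rs", ".java"), ("// ", "", "//", False)),
--     ".md": ("<!-- ", " -->", "<!-- -->", False),
--     **dict.fromkeys((".c", ".cpp", ".h", ".hpp", ".css"), (" * ", "", " *", True)),
-- }
--
--
-- def format_header(header, ext):
--     """Format header with proper comment characters per line based on file extension."""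
--     style = _STYLES.get(ext)
--     if style is None:
--         return ""
--     pfx, sfx, empty, block = style
--     body = ""
--     s = header
--     while True:
--         head, sep, s = s.partition("\n")
--         body += pfx + head + sfx if head else empty
--         if not sep:
--             break
--         body += "\n"
--     return "/*\n" + body + "\n */" if block else body
-- ===== Notes on version B (the rewrite author's own statement) =====
-- stated objective: alternative
-- what changed: Replaces split-into-lines + per-branch comprehension + join by a style table and a single while-loop that consumes the string with str.partition('\n'), formatting each line and appending it (and separators) directly to the output string.
import Mathlib
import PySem

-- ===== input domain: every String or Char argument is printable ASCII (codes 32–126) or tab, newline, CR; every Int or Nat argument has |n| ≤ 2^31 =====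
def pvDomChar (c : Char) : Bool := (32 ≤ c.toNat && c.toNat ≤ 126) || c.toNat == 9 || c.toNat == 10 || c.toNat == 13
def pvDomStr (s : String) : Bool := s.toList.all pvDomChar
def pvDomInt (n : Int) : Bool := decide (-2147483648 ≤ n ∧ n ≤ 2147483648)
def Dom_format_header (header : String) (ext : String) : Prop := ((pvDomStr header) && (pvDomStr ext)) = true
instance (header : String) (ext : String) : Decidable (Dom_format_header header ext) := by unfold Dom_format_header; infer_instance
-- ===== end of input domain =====

-- B replaces split-into-lines + per-branch comprehension + join by a style table plus one
-- partition-driven loop that appends each formatted line (and separators) directly to the output.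

-- ===== PORT A =====
def format_header (header : String) (ext : String) : String :=
  let lines := (PySem.Str.split? header "\n").getD []
  let formatted_lines : List String :=
    if ext = ".py" ∨ ext = ".sh" then
      lines.map (fun line => if line ≠ "" then "# " ++ line else "#")
    else if ext = ".js" ∨ ext = ".ts" ∨ ext = ".go" ∨ ext = ".rs" ∨ ext = ".java" then
      lines.map (fun line => if line ≠ "" then "// " ++ line else "//")
    else if ext = ".md" then
      lines.map (fun line => if line ≠ "" then "<!-- " ++ line ++ " -->" else "<!-- -->")
    else if ext = ".c" ∨ ext = ".cpp" ∨ ext = ".h" ∨ ext = ".hpp" ∨ ext = ".css" then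
      ["/*"] ++ lines.map (fun line => if line ≠ "" then " * " ++ line else " *") ++ [" */"]
    else []
  PySem.Str.join "\n" formatted_lines

-- ===== PORT B =====
-- style table: extension ↦ (line prefix, line suffix, empty-line token, block comment?)
def pvStyles : PySem.Dict String (String × String × String × Bool) :=
  PySem.Dict.mk
    [(".py", ("# ", "", "#", false)), (".sh", ("# ", "", "#", false)),
     (".js", ("// ", "", "//", false)), (".ts", ("// ", "", "//", false)),
     (".go", ("// ", "", "//", false)), (".rs", ("// ", "", "//", false)),
     (".java", ("// ", "", "//", false)),
     (".md", ("<!-- ", " -->", "<!-- -->", false)),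
     (".c", (" * ", "", " *", true)), (".cpp", (" * ", "", " *", true)),
     (".h", (" * ", "", " *", true)), (".hpp", (" * ", "", " *", true)),
     (".css", (" * ", "", " *", true))]

-- hand port of s.partition("\n") on code points (PySem has no partition); exact:
-- (chars before the first '\n', whether a '\n' occurs [Python: sep ≠ ""], chars after it).
def pvPartNl : List Char → List Char × Bool × List Char
  | [] => ([], false, [])
  | c :: rest =>
    if c = '\n' then ([], true, rest)
    else
      let (h, f, r) := pvPartNl rest
      (c :: h, f, r)

theorem pvPartNl_rest_lt : ∀ (s : List Char), (pvPartNl s).2.1 = true → (pvPartNl s).2.2.length < s.length := by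
  intro s
  induction s with
  | nil => simp [pvPartNl]
  | cons c rest ih =>
    by_cases hc : c = '\n'
    · simp [pvPartNl, hc]
    · simp only [pvPartNl, if_neg hc]
      intro hf
      exact Nat.lt_succ_of_lt (ih hf)

-- the while-loop of Source B: consume the string with partition, appending to the accumulated body
def pvFmtLoop (pfx sfx empty : List Char) (body : List Char) (s : List Char) : List Char :=
  match hp : pvPartNl s with
  | (head, found, rest) =>
    let body' := body ++ (if head ≠ [] then pfx ++ head ++ sfx else empty)
    if hf : found = true then
      pvFmtLoop pfx sfx empty (body' ++ ['\n']) rest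
    else body'
termination_by s.length
decreasing_by
  have := pvPartNl_rest_lt s (by rw [hp]; exact hf)
  rw [hp] at this
  exact this

def format_header_alt (header : String) (ext : String) : String :=
  match pvStyles.get? ext with
  | none => ""
  | some (pfx, sfx, empty, block) =>
    let body := pvFmtLoop pfx.toList sfx.toList empty.toList [] header.toList
    if block then String.ofList ("/*".toList ++ '\n' :: body ++ '\n' :: " */".toList)
    else String.ofList body

-- ===== PRECONDITION & SPEC =====
def Spec_format_header (header : String) (ext : String) (out : String) : Prop := out = format_header_alt header ext
instance (header : String) (ext : String) (out : String) : Decidable (Spec_format_header header ext out) := by unfold Spec_format_header; infer_instance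

-- ===== CLAIM (what is proved, stated in full; the proofs are below) =====
def Claim_equal_format_header : Prop := ∀ (header : String) (ext : String), Dom_format_header header ext → Spec_format_header header ext (format_header header ext)

-- ===== LEMMAS AND PROOFS =====

-- reference split on '\n' (proof-only helper)
def pySplitNl : List Char → List (List Char)
  | [] => [[]]
  | c :: rest => if c = '\n' then [] :: pySplitNl rest else (pySplitNl rest).modifyHead (c :: ·)

theorem splitOn_go_eq : ∀ (fuel : Nat) (l cur : List Char) (acc : List (List Char)),
    l.length ≤ fuel →
    PySem.Chars.splitOn.go ['\n'] fuel l cur acc = acc.reverse ++ (pySplitNl l).modifyHead (cur.reverse ++ ·) := by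
  intro fuel
  induction fuel with
  | zero =>
    intro l cur acc hl
    have : l = [] := by cases l <;> simp_all
    subst this
    simp [PySem.Chars.splitOn.go, pySplitNl]
  | succ fuel ih =>
    intro l cur acc hl
    cases l with
    | nil => simp [PySem.Chars.splitOn.go, pySplitNl]
    | cons c rest =>
      by_cases hc : c = '\n'
      · subst hc
        rw [show PySem.Chars.splitOn.go ['\n'] (fuel+1) ('\n'::rest) cur acc
              = PySem.Chars.splitOn.go ['\n'] fuel rest [] (cur.reverse :: acc) by
            simp [PySem.Chars.splitOn.go, List.isPrefixOf]]
        rw [ih rest [] (cur.reverse :: acc) (by simpa using Nat.le_of_succ_le_succ hl)]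
        have h2 : (pySplitNl rest).modifyHead (fun x => [].reverse ++ x) = pySplitNl rest := by
          cases pySplitNl rest <;> simp
        rw [h2]
        simp [pySplitNl]
      · rw [show PySem.Chars.splitOn.go ['\n'] (fuel+1) (c::rest) cur acc
              = PySem.Chars.splitOn.go ['\n'] fuel rest (c :: cur) acc by
            simp [PySem.Chars.splitOn.go, List.isPrefixOf, Ne.symm hc]]
        rw [ih rest (c :: cur) acc (by simpa using Nat.le_of_succ_le_succ hl)]
        simp only [pySplitNl, if_neg hc]
        cases pySplitNl rest <;> simp
theorem splitOn_eq_pySplitNl (cs : List Char) : PySem.Chars.splitOn cs ['\n'] = pySplitNl cs := by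
  rw [PySem.Chars.splitOn, splitOn_go_eq (cs.length+1) cs [] [] (Nat.le_succ _)]
  cases h : pySplitNl cs <;> simp

theorem split?_nl (header : String) :
    PySem.Str.split? header "\n" = some ((pySplitNl header.toList).map String.ofList) := by
  have h1 : PySem.Chars.split? header.toList ['\n'] = some (PySem.Chars.splitOn header.toList ['\n']) := by
    simp [PySem.Chars.split?]
  simp [PySem.Str.split?, show ("\n" : String).toList = ['\n'] from rfl, h1, splitOn_eq_pySplitNl]

theorem ofList_ne_empty_iff (l : List Char) : (String.ofList l ≠ "") ↔ l ≠ [] := by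
  constructor
  · intro h hl; subst hl; simp at h
  · intro h he
    have : (String.ofList l).toList = ("" : String).toList := by rw [he]
    simp at this
    exact h this

theorem pySplitNl_partNl (s : List Char) :
    pySplitNl s = (pvPartNl s).1 :: (if (pvPartNl s).2.1 then pySplitNl (pvPartNl s).2.2 else []) := by
  induction s with
  | nil => simp [pySplitNl, pvPartNl]
  | cons c rest ih =>
    by_cases hc : c = '\n'
    · simp [pySplitNl, pvPartNl, hc]
    · simp only [pySplitNl, pvPartNl, if_neg hc]
      rw [ih]
      cases h : pvPartNl rest with
      | mk a b => simp

theorem pySplitNl_ne_nil (s : List Char) : pySplitNl s ≠ [] := by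
  rw [pySplitNl_partNl]; simp

theorem fmtLoop_eq (pfx sfx empty : List Char) : ∀ (body s : List Char),
    pvFmtLoop pfx sfx empty body s
      = body ++ PySem.Chars.join ['\n']
          ((pySplitNl s).map (fun l => if l ≠ [] then pfx ++ l ++ sfx else empty)) := by
  intro body s
  fun_induction pvFmtLoop pfx sfx empty body s with
  | case1 body s head rest body' hp ih =>
    rw [pySplitNl_partNl s, hp]
    simp only [dite_true]
    have hb : body' = body ++ (if head ≠ [] then pfx ++ head ++ sfx else empty) := rfl
    rw [hb] at ih
    rw [ih]
    have hne := pySplitNl_ne_nil rest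
    cases hsp : pySplitNl rest with
    | nil => exact absurd hsp hne
    | cons p ps =>
      simp [PySem.Chars.join, List.intercalate, List.append_assoc]
  | case2 body s head rest body' hp hf =>
    rw [pySplitNl_partNl s, hp]
    simp only [Bool.not_eq_true] at hf
    simp [hf, PySem.Chars.join, List.intercalate]

theorem join_cons_ne (sep a : List Char) (l : List (List Char)) (h : l ≠ []) :
    PySem.Chars.join sep (a :: l) = a ++ sep ++ PySem.Chars.join sep l := by
  cases l with
  | nil => exact absurd rfl h
  | cons b t => simpa [List.append_assoc] using PySem.Chars.join_cons_cons sep a b t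

theorem join_append_single (sep z : List Char) : ∀ (l : List (List Char)), l ≠ [] →
    PySem.Chars.join sep (l ++ [z]) = PySem.Chars.join sep l ++ sep ++ z := by
  intro l
  induction l with
  | nil => simp
  | cons a t ih =>
    intro _
    cases t with
    | nil => simp [PySem.Chars.join, List.intercalate]
    | cons b u =>
      have h1 := join_cons_ne sep a ((b :: u) ++ [z]) (by simp)
      have h2 := join_cons_ne sep a (b :: u) (by simp)
      simp only [List.cons_append] at h1 ⊢
      rw [h1, show b :: (u ++ [z]) = (b :: u) ++ [z] from rfl, ih (by simp), h2]
      simp [List.append_assoc]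

theorem lineStyle_eq (pfx sfx empty : String) (header : String) (fA : String → String)
    (hA : ∀ l : List Char, (fA (String.ofList l)).toList
            = if l ≠ [] then pfx.toList ++ l ++ sfx.toList else empty.toList) :
    PySem.Str.join "\n" (((PySem.Str.split? header "\n").getD []).map fA)
      = String.ofList (pvFmtLoop pfx.toList sfx.toList empty.toList [] header.toList) := by
  rw [split?_nl, fmtLoop_eq]
  simp only [Option.getD_some, PySem.Str.join, List.map_map, List.nil_append]
  congr 1
  rw [show ("\n" : String).toList = ['\n'] from rfl]
  congr 1
  apply List.map_congr_left
  intro l _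
  exact hA l

theorem blockStyle_eq (pfx sfx empty : String) (header : String) (fA : String → String)
    (hA : ∀ l : List Char, (fA (String.ofList l)).toList
            = if l ≠ [] then pfx.toList ++ l ++ sfx.toList else empty.toList) :
    PySem.Str.join "\n" (["/*"] ++ (((PySem.Str.split? header "\n").getD []).map fA) ++ [" */"])
      = String.ofList ("/*".toList ++ '\n' :: pvFmtLoop pfx.toList sfx.toList empty.toList [] header.toList ++ '\n' :: " */".toList) := by
  rw [split?_nl, fmtLoop_eq]
  simp only [Option.getD_some, PySem.Str.join, List.map_map, List.nil_append, List.map_append,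
    List.map_cons, List.map_nil]
  congr 1
  rw [show ("\n" : String).toList = ['\n'] from rfl]
  set M := List.map (String.toList ∘ fA ∘ String.ofList) (pySplitNl header.toList) with hMdef
  have hM : M = (pySplitNl header.toList).map
      (fun l => if l ≠ [] then pfx.toList ++ l ++ sfx.toList else empty.toList) := by
    rw [hMdef]; exact List.map_congr_left (fun l _ => hA l)
  have hne : M ≠ [] := by
    rw [hMdef]; simp [pySplitNl_ne_nil]
  rw [show ["/*".toList] ++ M ++ [" */".toList] = "/*".toList :: (M ++ [" */".toList]) by simp]
  rw [join_cons_ne _ _ _ (by simp), join_append_single _ _ _ hne, hM]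
  simp [List.append_assoc]

-- ===== VERDICT (by name: the statement is the Claim_ definition above) =====
theorem format_header_spec : Claim_equal_format_header := by
  intro header ext _
  unfold Spec_format_header format_header format_header_alt pvStyles
  by_cases hE0 : ext = ".py"
  · subst hE0
    simp only [PySem.Dict.get?_mk_cons, String.reduceEq, or_true, true_or, or_false, false_or,
      if_true, if_false, reduceIte, Bool.false_eq_true]
    exact lineStyle_eq "# " "" "#" header _ (by intro l; by_cases hl : l = [] <;> simp [hl, ofList_ne_empty_iff])
  by_cases hE1 : ext = ".sh"
  · subst hE1
    simp only [PySem.Dict.get?_mk_cons, String.reduceEq, or_true, true_or, or_false, false_or,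
      if_true, if_false, reduceIte, Bool.false_eq_true]
    exact lineStyle_eq "# " "" "#" header _ (by intro l; by_cases hl : l = [] <;> simp [hl, ofList_ne_empty_iff])
  by_cases hE2 : ext = ".js"
  · subst hE2
    simp only [PySem.Dict.get?_mk_cons, String.reduceEq, or_true, true_or, or_false, false_or,
      if_true, if_false, reduceIte, Bool.false_eq_true]
    exact lineStyle_eq "// " "" "//" header _ (by intro l; by_cases hl : l = [] <;> simp [hl, ofList_ne_empty_iff])
  by_cases hE3 : ext = ".ts"
  · subst hE3
    simp only [PySem.Dict.get?_mk_cons, String.reduceEq, or_true, true_or, or_false, false_or,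
      if_true, if_false, reduceIte, Bool.false_eq_true]
    exact lineStyle_eq "// " "" "//" header _ (by intro l; by_cases hl : l = [] <;> simp [hl, ofList_ne_empty_iff])
  by_cases hE4 : ext = ".go"
  · subst hE4
    simp only [PySem.Dict.get?_mk_cons, String.reduceEq, or_true, true_or, or_false, false_or,
      if_true, if_false, reduceIte, Bool.false_eq_true]
    exact lineStyle_eq "// " "" "//" header _ (by intro l; by_cases hl : l = [] <;> simp [hl, ofList_ne_empty_iff])
  by_cases hE5 : ext = ".rs"
  · subst hE5
    simp only [PySem.Dict.get?_mk_cons, String.reduceEq, or_true, true_or, or_false, false_or,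
      if_true, if_false, reduceIte, Bool.false_eq_true]
    exact lineStyle_eq "// " "" "//" header _ (by intro l; by_cases hl : l = [] <;> simp [hl, ofList_ne_empty_iff])
  by_cases hE6 : ext = ".java"
  · subst hE6
    simp only [PySem.Dict.get?_mk_cons, String.reduceEq, or_true, true_or, or_false, false_or,
      if_true, if_false, reduceIte, Bool.false_eq_true]
    exact lineStyle_eq "// " "" "//" header _ (by intro l; by_cases hl : l = [] <;> simp [hl, ofList_ne_empty_iff])
  by_cases hE7 : ext = ".md"
  · subst hE7
    simp only [PySem.Dict.get?_mk_cons, String.reduceEq, or_true, true_or, or_false, false_or,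
      if_true, if_false, reduceIte, Bool.false_eq_true]
    exact lineStyle_eq "<!-- " " -->" "<!-- -->" header _ (by intro l; by_cases hl : l = [] <;> simp [hl, ofList_ne_empty_iff])
  by_cases hE8 : ext = ".c"
  · subst hE8
    simp only [PySem.Dict.get?_mk_cons, String.reduceEq, or_true, true_or, or_false, false_or,
      if_true, if_false, reduceIte, Bool.false_eq_true]
    exact blockStyle_eq " * " "" " *" header _ (by intro l; by_cases hl : l = [] <;> simp [hl, ofList_ne_empty_iff])
  by_cases hE9 : ext = ".cpp"
  · subst hE9
    simp only [PySem.Dict.get?_mk_cons, String.reduceEq, or_true, true_or, or_false, false_or,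
      if_true, if_false, reduceIte, Bool.false_eq_true]
    exact blockStyle_eq " * " "" " *" header _ (by intro l; by_cases hl : l = [] <;> simp [hl, ofList_ne_empty_iff])
  by_cases hE10 : ext = ".h"
  · subst hE10
    simp only [PySem.Dict.get?_mk_cons, String.reduceEq, or_true, true_or, or_false, false_or,
      if_true, if_false, reduceIte, Bool.false_eq_true]
    exact blockStyle_eq " * " "" " *" header _ (by intro l; by_cases hl : l = [] <;> simp [hl, ofList_ne_empty_iff])
  by_cases hE11 : ext = ".hpp"
  · subst hE11
    simp only [PySem.Dict.get?_mk_cons, String.reduceEq, or_true, true_or, or_false, false_or,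
      if_true, if_false, reduceIte, Bool.false_eq_true]
    exact blockStyle_eq " * " "" " *" header _ (by intro l; by_cases hl : l = [] <;> simp [hl, ofList_ne_empty_iff])
  by_cases hE12 : ext = ".css"
  · subst hE12
    simp only [PySem.Dict.get?_mk_cons, String.reduceEq, or_true, true_or, or_false, false_or,
      if_true, if_false, reduceIte, Bool.false_eq_true]
    exact blockStyle_eq " * " "" " *" header _ (by intro l; by_cases hl : l = [] <;> simp [hl, ofList_ne_empty_iff])
  · -- unknown extension: both sides empty
    simp [hE0, hE1, hE2, hE3, hE4, hE5, hE6, hE7, hE8, hE9, hE10, hE11, hE12, Ne.symm hE0, Ne.symm hE1, Ne.symm hE2, Ne.symm hE3, Ne.symm hE4, Ne.symm hE5, Ne.symm hE6, Ne.symm hE7, Ne.symm hE8, Ne.symm hE9, Ne.symm hE10, Ne.symm hE11, Ne.symm hE12, PySem.Dict.get?, PySem.Str.join, PySem.Chars.join, List.intercalate]
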